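-- pv_equiv track=rewrite | github.com/versa-dev/distinct-tree-python | distinct_tree.py | solution
-- ===== SOURCE A (Python) =====
-- import math
--
-- def solution(Tree):
--   paths = []
--   nums = []
--   for i in range(len(Tree)):
--     if (Tree[i] != "x"):
--       path = []
--       path.append(Tree[i])
--       j = i
--       while(j>0):
--         j = math.floor((j-1)/2)
--         path.append(Tree[j])
--       paths.append(path)
--       nums.append(len(list(set(path))))
--
--   num = max(nums)
--   re_path = []
--   for i in range(len(paths)):
--     if (num == nums[i]):
--       path = paths[i]
--       re_path.append(path)
--
--   results = []
--   for path in re_path: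
--     result = ""
--     for item in path:
--       result = item + "-" + result
--     results.append(result)
--   return results
-- ===== SOURCE B (Python) =====
-- def solution(Tree):
--   # Top-down DP over the heap array: each node extends its parent's
--   # already-built path string and distinct-value set, instead of re-walking
--   # the ancestor chain per node.
--   n = len(Tree)
--   prefs = [""] * n
--   dsets = [set()] * n
--   counts = [0] * n
--   for i in range(n):
--     if i == 0:
--       base_pref, base_set = "", set()
--     else:
--       p = (i - 1) // 2
--       base_pref, base_set = prefs[p], dsets[p]
--     prefs[i] = base_pref + Tree[i] + "-"
--     dsets[i] = base_set | {Tree[i]}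
--     counts[i] = len(dsets[i])
--   best = max(counts[i] for i in range(n) if Tree[i] != "x")
--   return [prefs[i] for i in range(n) if Tree[i] != "x" and counts[i] == best]
-- ===== Notes on version B (the rewrite author's own statement) =====
-- stated objective: faster
-- what changed: Instead of re-walking the ancestor chain for every node and re-building its path list, set and string from scratch, B does one top-down pass in which each node extends its parent's already-computed path string and distinct-value set (parent index (i-1)//2 is always processed earlier).
import Mathlib
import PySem

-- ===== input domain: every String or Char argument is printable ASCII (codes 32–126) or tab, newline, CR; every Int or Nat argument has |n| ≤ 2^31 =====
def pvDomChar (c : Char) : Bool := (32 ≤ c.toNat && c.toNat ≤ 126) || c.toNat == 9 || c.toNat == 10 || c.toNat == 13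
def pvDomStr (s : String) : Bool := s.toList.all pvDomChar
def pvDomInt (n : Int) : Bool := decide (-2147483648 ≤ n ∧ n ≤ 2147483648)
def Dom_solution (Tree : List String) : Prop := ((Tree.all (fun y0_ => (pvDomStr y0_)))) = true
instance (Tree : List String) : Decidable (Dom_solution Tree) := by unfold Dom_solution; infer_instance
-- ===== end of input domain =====

-- B replaces A's per-node ancestor re-walk (path list, set and string rebuilt from
-- scratch for every node) with one top-down pass extending the parent's path string
-- and distinct-value set; return values only (neither mutates its argument).

-- ===== PORT A =====
-- A's inner 'while j>0' loop; Python's math.floor((j-1)/2) equals Nat (j-1)/2 for the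
-- reachable j ≥ 1 (exact); Tree[j] via getD is exact since 0 ≤ j < len(Tree) on every
-- reachable iteration.
def solWhile (Tree : List String) (j : Nat) (path : List String) : List String :=
  if j > 0 then
    solWhile Tree ((j - 1) / 2) (path ++ [Tree.getD ((j - 1) / 2) ""])
  else path
termination_by j
decreasing_by have := Nat.div_le_self (j - 1) 2; omega

def solution (Tree : List String) : List String :=
  let pn := (List.range Tree.length).foldl
    (fun (st : List (List String) × List Nat) i =>
      if Tree.getD i "" ≠ "x" then
        let path := solWhile Tree i [Tree.getD i ""]
        (st.1 ++ [path], st.2 ++ [(PySem.Set.ofList path).length])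
      else st) ([], [])
  match PySem.List.max? pn.2 (fun x => x) with
  | none => []   -- Python raises ValueError (max of empty) here; excluded by Pre_solution
  | some num =>
    let rePath := (pn.1.zip pn.2).foldl
      (fun acc pr => if num = pr.2 then acc ++ [pr.1] else acc) []
    rePath.foldl (fun results path =>
      results ++ [path.foldl (fun result item => item ++ "-" ++ result) ""]) []

-- ===== PORT B =====
def solution_alt (Tree : List String) : List String :=
  let n := Tree.length
  let st := (List.range n).foldl
    (fun (st : List String × List (PySem.Set String) × List Nat) i =>
      let basePref := if i = 0 then "" else st.1.getD ((i - 1) / 2) ""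
      let baseSet := if i = 0 then PySem.Set.empty else st.2.1.getD ((i - 1) / 2) PySem.Set.empty
      let pref := basePref ++ Tree.getD i "" ++ "-"
      let ds := PySem.Set.union baseSet (PySem.Set.ofList [Tree.getD i ""])
      (st.1 ++ [pref], st.2.1 ++ [ds], st.2.2 ++ [ds.length]))
    ([], [], [])
  let cands := (List.range n).filter (fun i => Tree.getD i "" ≠ "x")
  match PySem.List.max? (cands.map (fun i => st.2.2.getD i 0)) (fun x => x) with
  | none => []   -- Python raises ValueError (max of empty generator); excluded by Pre_solution
  | some best => (cands.filter (fun i => st.2.2.getD i 0 = best)).map (fun i => st.1.getD i "")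

-- ===== PRECONDITION & SPEC =====
-- Pre_ excludes exactly the inputs (no node different from "x", incl. the empty list)
-- on which both A and B raise ValueError from max() of an empty sequence.
def Pre_solution (Tree : List String) : Prop := ∃ s ∈ Tree, s ≠ "x"
instance (Tree : List String) : Decidable (Pre_solution Tree) := by unfold Pre_solution; infer_instance
def pvWitness_solution : List String := (["a", "x", "b"])

def Spec_solution (Tree : List String) (out : List String) : Prop := out = solution_alt Tree
instance (Tree : List String) (out : List String) : Decidable (Spec_solution Tree out) := by unfold Spec_solution; infer_instance

-- ===== CLAIM (what is proved, stated in full; the proofs are below) =====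
def Claim_equal_solution : Prop := ∀ (Tree : List String), Dom_solution Tree → Pre_solution Tree → Spec_solution Tree (solution Tree)

-- ===== LEMMAS AND PROOFS =====

-- The node-to-root value path of index j, as a recursion on the parent (j-1)/2.
def pathSpec (Tree : List String) : Nat → List String
  | 0 => [Tree.getD 0 ""]
  | (j+1) => Tree.getD (j+1) "" :: pathSpec Tree (j / 2)
decreasing_by have := Nat.div_le_self j 2; omega

-- The ancestor tail (path without the node itself).
def tailSpec (Tree : List String) : Nat → List String
  | 0 => []
  | (j+1) => Tree.getD (j / 2) "" :: tailSpec Tree (j / 2)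
decreasing_by have := Nat.div_le_self j 2; omega

-- B's per-index quantities.
def prefSpec (Tree : List String) : Nat → String
  | 0 => Tree.getD 0 "" ++ "-"
  | (j+1) => prefSpec Tree (j / 2) ++ Tree.getD (j+1) "" ++ "-"
decreasing_by have := Nat.div_le_self j 2; omega

def dsetSpec (Tree : List String) : Nat → PySem.Set String
  | 0 => PySem.Set.add PySem.Set.empty (Tree.getD 0 "")
  | (j+1) => PySem.Set.add (dsetSpec Tree (j / 2)) (Tree.getD (j+1) "")
decreasing_by have := Nat.div_le_self j 2; omega

theorem solWhile_eq_tail (Tree : List String) (j : Nat) (acc : List String) :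
    solWhile Tree j acc = acc ++ tailSpec Tree j := by
  induction j using Nat.strong_induction_on generalizing acc with
  | _ j ih =>
    cases j with
    | zero => simp [solWhile, tailSpec]
    | succ k =>
      have hlt : k / 2 < k + 1 := by have := Nat.div_le_self k 2; omega
      rw [solWhile]
      simp only [Nat.add_sub_cancel, if_pos (Nat.succ_pos k)]
      rw [ih (k / 2) hlt]
      simp [tailSpec]

theorem pathSpec_eq (Tree : List String) (j : Nat) :
    pathSpec Tree j = Tree.getD j "" :: tailSpec Tree j := by
  induction j using Nat.strong_induction_on with
  | _ j ih =>
    cases j with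
    | zero => simp [pathSpec, tailSpec]
    | succ k =>
      have hlt : k / 2 < k + 1 := by have := Nat.div_le_self k 2; omega
      rw [pathSpec, tailSpec, ih (k / 2) hlt]

theorem foldl_dash_acc (l : List String) (acc : String) :
    l.foldl (fun result item => item ++ "-" ++ result) acc
      = l.foldl (fun result item => item ++ "-" ++ result) "" ++ acc := by
  induction l generalizing acc with
  | nil => simp [List.foldl]
  | cons x l ih =>
    simp only [List.foldl_cons]
    rw [ih (x ++ "-" ++ acc), ih (x ++ "-" ++ "")]
    simp [String.append_assoc]

theorem strFold_eq_pref (Tree : List String) (j : Nat) :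
    (pathSpec Tree j).foldl (fun result item => item ++ "-" ++ result) "" = prefSpec Tree j := by
  induction j using Nat.strong_induction_on with
  | _ j ih =>
    cases j with
    | zero => simp [pathSpec, prefSpec]
    | succ k =>
      have hlt : k / 2 < k + 1 := by have := Nat.div_le_self k 2; omega
      rw [pathSpec, prefSpec, ← ih (k / 2) hlt]
      simp only [List.foldl_cons]
      rw [foldl_dash_acc]
      simp [String.append_assoc]

theorem dsetSpec_nodup (Tree : List String) (j : Nat) : (dsetSpec Tree j).Nodup := by
  induction j using Nat.strong_induction_on with
  | _ j ih =>
    cases j with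
    | zero => rw [dsetSpec]; exact PySem.Set.nodup_add _ _ List.nodup_nil
    | succ k =>
      have hlt : k / 2 < k + 1 := by have := Nat.div_le_self k 2; omega
      rw [dsetSpec]
      exact PySem.Set.nodup_add _ _ (ih (k / 2) hlt)

theorem dsetSpec_mem (Tree : List String) (j : Nat) (y : String) :
    y ∈ dsetSpec Tree j ↔ y ∈ pathSpec Tree j := by
  induction j using Nat.strong_induction_on with
  | _ j ih =>
    cases j with
    | zero => simp [dsetSpec, pathSpec, PySem.Set.empty]
    | succ k =>
      have hlt : k / 2 < k + 1 := by have := Nat.div_le_self k 2; omega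
      rw [dsetSpec, pathSpec]
      simp [PySem.Set.mem_add, ih (k / 2) hlt, or_comm]

theorem dsetSpec_len (Tree : List String) (j : Nat) :
    (PySem.Set.ofList (pathSpec Tree j)).length = (dsetSpec Tree j).length := by
  refine List.Perm.length_eq ?_
  refine (List.perm_ext_iff_of_nodup (PySem.Set.nodup_ofList _) (dsetSpec_nodup Tree j)).mpr ?_
  intro a
  simp [PySem.Set.mem_ofList, dsetSpec_mem]

theorem set_union_singleton (s : PySem.Set String) (x : String) :
    PySem.Set.union s (PySem.Set.ofList [x]) = PySem.Set.add s x := by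
  simp [PySem.Set.union, PySem.Set.update, PySem.Set.ofList, PySem.Set.add]

theorem getD_map_range {A : Type} (f : Nat → A) (d : A) {p k : Nat} (h : p < k) :
    ((List.range k).map f).getD p d = f p := by
  rw [List.getD_eq_getElem?_getD]
  simp [List.getElem?_map, List.getElem?_range h]

theorem foldB (Tree : List String) (k : Nat) :
    (List.range k).foldl
      (fun (st : List String × List (PySem.Set String) × List Nat) i =>
        let basePref := if i = 0 then "" else st.1.getD ((i - 1) / 2) ""
        let baseSet := if i = 0 then PySem.Set.empty else st.2.1.getD ((i - 1) / 2) PySem.Set.empty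
        let pref := basePref ++ Tree.getD i "" ++ "-"
        let ds := PySem.Set.union baseSet (PySem.Set.ofList [Tree.getD i ""])
        (st.1 ++ [pref], st.2.1 ++ [ds], st.2.2 ++ [ds.length]))
      ([], [], [])
    = ((List.range k).map (prefSpec Tree), (List.range k).map (dsetSpec Tree),
       (List.range k).map (fun i => (dsetSpec Tree i).length)) := by
  induction k with
  | zero => simp
  | succ k ih =>
    rw [List.range_succ, List.foldl_append, ih]
    simp only [List.foldl_cons, List.foldl_nil, List.map_append, List.map_cons, List.map_nil]
    cases k with
    | zero =>
      simp [prefSpec, dsetSpec, set_union_singleton]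
    | succ m =>
      have hp : (m + 1 - 1) / 2 < m + 1 := by have := Nat.div_le_self m 2; omega
      simp only [Nat.add_sub_cancel] at hp ⊢
      rw [if_neg (Nat.succ_ne_zero m), if_neg (Nat.succ_ne_zero m),
          getD_map_range (prefSpec Tree) "" hp,
          getD_map_range (dsetSpec Tree) PySem.Set.empty hp]
      rw [set_union_singleton]
      simp [prefSpec, dsetSpec, String.append_assoc]

theorem foldl_filter_fst {A : Type} (num : Nat) (l : List (A × Nat)) (acc : List A) :
    l.foldl (fun acc pr => if num = pr.2 then acc ++ [pr.1] else acc) acc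
      = acc ++ (l.filter (fun pr => num = pr.2)).map Prod.fst := by
  induction l generalizing acc with
  | nil => simp
  | cons x l ih =>
    simp only [List.foldl_cons, List.filter_cons]
    by_cases h : num = x.2
    · rw [if_pos h, ih]; simp [h]
    · rw [if_neg h, ih]; simp [h]

theorem foldA (Tree : List String) (k : Nat) :
    (List.range k).foldl
      (fun (st : List (List String) × List Nat) i =>
        if Tree.getD i "" ≠ "x" then
          let path := solWhile Tree i [Tree.getD i ""]
          (st.1 ++ [path], st.2 ++ [(PySem.Set.ofList path).length])
        else st) ([], [])
    = (((List.range k).filter (fun i => Tree.getD i "" ≠ "x")).map (pathSpec Tree),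
       ((List.range k).filter (fun i => Tree.getD i "" ≠ "x")).map
         (fun i => (PySem.Set.ofList (pathSpec Tree i)).length)) := by
  induction k with
  | zero => simp
  | succ k ih =>
    rw [List.range_succ, List.foldl_append, ih, List.filter_append]
    by_cases h : Tree[k]?.getD "" = "x"
    · simp [h]
    · have hpath : solWhile Tree k [Tree[k]?.getD ""] = pathSpec Tree k := by
        rw [← List.getD_eq_getElem?_getD, solWhile_eq_tail, pathSpec_eq]
        simp
      simp [h, hpath]

-- ===== VERDICT (by name: the statement is the Claim_ definition above) =====
theorem solution_spec : Claim_equal_solution := by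
  intro Tree _ _
  unfold Spec_solution
  rw [solution, solution_alt]
  rw [foldA, foldB]
  set F := (List.range Tree.length).filter (fun i => Tree.getD i "" ≠ "x") with hF
  have hmemF : ∀ i ∈ F, i < Tree.length := by
    intro i hi
    have := List.mem_filter.mp hi
    exact List.mem_range.mp this.1
  have hnums : F.map (fun i => (PySem.Set.ofList (pathSpec Tree i)).length)
      = F.map (fun i => (dsetSpec Tree i).length) :=
    List.map_congr_left (fun i _ => dsetSpec_len Tree i)
  have hcnts : F.map (fun i => ((List.range Tree.length).map
        (fun i => (dsetSpec Tree i).length)).getD i 0)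
      = F.map (fun i => (dsetSpec Tree i).length) :=
    List.map_congr_left (fun i hi => getD_map_range _ 0 (hmemF i hi))
  simp only [hnums, hcnts]
  cases hmax : PySem.List.max? (F.map (fun i => (dsetSpec Tree i).length)) (fun x => x) with
  | none => rfl
  | some num =>
    simp only []
    rw [List.zip_map', foldl_filter_fst, List.nil_append, List.filter_map, List.map_map,
        PySem.List.foldl_append_singleton_eq_map, List.nil_append, List.map_map]
    have hfilter : F.filter (fun i => ((List.range Tree.length).map
          (fun i => (dsetSpec Tree i).length)).getD i 0 = num)
        = F.filter (fun i => (fun pr : List String × Nat => num = pr.2) ∘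
            (fun i => (pathSpec Tree i, (dsetSpec Tree i).length)) <| i) := by
      refine List.filter_congr ?_
      intro i hi
      rw [getD_map_range _ 0 (hmemF i hi)]
      simp [eq_comm]
    rw [hfilter]
    refine List.map_congr_left ?_
    intro i hi
    have hi' : i < Tree.length := hmemF i (List.mem_of_mem_filter hi)
    simp only [Function.comp]
    rw [getD_map_range _ "" hi', strFold_eq_pref]
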